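-- pv_equiv track=rewrite | github.com/Fatman2080/SwarmForge | eval/run_pipeline.py | stage5_select
-- ===== SOURCE A (Python) =====
-- def stage5_select(verified: list[dict]) -> dict:
--     """Pick the best candidate: prefer orig_pass, then total_pass, then first."""
--     orig_passers = [v for v in verified if v["orig_pass"]]
--     if orig_passers:
--         best = sorted(orig_passers, key=lambda x: -x["total_pass"])
--         return best[0]
--
--     aux_passers = [v for v in verified if v["aux_pass"]]
--     if aux_passers:
--         return aux_passers[0]
--
--     return verified[0]
-- ===== SOURCE B (Python) =====
-- def stage5_select(verified: list[dict]) -> dict: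
--     """Pick the best candidate: prefer orig_pass, then total_pass, then first."""
--     best = None
--     best_tp = 0
--     for v in verified:
--         if v["orig_pass"]:
--             tp = v["total_pass"]
--             if best is None or tp > best_tp:
--                 best, best_tp = v, tp
--     if best is not None:
--         return best
--     for v in verified:
--         if v["aux_pass"]:
--             return v
--     return verified[0]
-- ===== Notes on version B (the rewrite author's own statement) =====
-- stated objective: alternative
-- what changed: Replaces the two list-comprehension filters plus a full sort of the orig-passers with a single running-maximum loop (strict > keeps the first among total_pass ties) and an early-exit scan for the first aux-passer; no intermediate lists and no sort.
import Mathlib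
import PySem

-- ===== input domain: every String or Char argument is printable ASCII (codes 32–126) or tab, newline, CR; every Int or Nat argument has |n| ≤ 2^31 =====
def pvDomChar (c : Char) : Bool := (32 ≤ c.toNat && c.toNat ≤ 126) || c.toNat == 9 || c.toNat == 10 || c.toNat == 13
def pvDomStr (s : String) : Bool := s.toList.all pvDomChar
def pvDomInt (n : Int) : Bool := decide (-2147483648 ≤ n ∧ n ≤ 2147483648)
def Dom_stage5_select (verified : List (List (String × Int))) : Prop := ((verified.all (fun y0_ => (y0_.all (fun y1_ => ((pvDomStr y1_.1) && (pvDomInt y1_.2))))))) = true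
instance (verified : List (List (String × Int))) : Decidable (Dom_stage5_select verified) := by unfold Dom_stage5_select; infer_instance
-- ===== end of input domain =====

-- B replaces the filter+sort selection by a single running-maximum pass and an early-exit scan (return value only; neither version mutates its argument).

-- shared dict primitive: Python's v[k] on an association list (first match)
def pvLookup : List (String × Int) → String → Option Int
  | [], _ => none
  | (k, x) :: t, q => if k = q then some x else pvLookup t q

-- truthiness of v[k] for an int value (missing key treated as falsy; Pre_ guarantees presence wherever Python reads it)
def pvTruthy (v : List (String × Int)) (k : String) : Bool := ((pvLookup v k).getD 0) != 0

def pvTP (v : List (String × Int)) : Int := (pvLookup v "total_pass").getD 0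

-- ===== PORT A =====
def stage5_select (verified : List (List (String × Int))) : List (String × Int) :=
  let orig_passers := verified.filter (fun v => pvTruthy v "orig_pass")
  if orig_passers ≠ [] then
    (PySem.List.sorted orig_passers (fun x => -(pvTP x)) false).headD []
  else
    let aux_passers := verified.filter (fun v => pvTruthy v "aux_pass")
    if aux_passers ≠ [] then aux_passers.headD []
    else verified.headD []

-- ===== PORT B =====
def stage5_select_alt (verified : List (List (String × Int))) : List (String × Int) :=
  let best := verified.foldl
    (fun acc v =>
      if pvTruthy v "orig_pass" then
        match acc with
        | none => some (v, pvTP v)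
        | some (b, bt) => if pvTP v > bt then some (v, pvTP v) else some (b, bt)
      else acc)
    (none : Option (List (String × Int) × Int))
  match best with
  | some (b, _) => b
  | none =>
    match verified.find? (fun v => pvTruthy v "aux_pass") with
    | some v => v
    | none => verified.headD []

-- ===== PRECONDITION & SPEC =====
-- Pre_ excludes exactly the inputs on which Python A raises: the empty list (IndexError when no
-- passer exists) and lists whose elements lack a key A reads there (KeyError).
def Pre_stage5_select (verified : List (List (String × Int))) : Prop :=
  verified ≠ [] ∧
  (∀ v ∈ verified, "orig_pass" ∈ v.map Prod.fst) ∧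
  (∀ v ∈ verified, (List.lookup "orig_pass" v).getD 0 ≠ 0 → "total_pass" ∈ v.map Prod.fst) ∧
  ((∀ v ∈ verified, (List.lookup "orig_pass" v).getD 0 = 0) → ∀ v ∈ verified, "aux_pass" ∈ v.map Prod.fst)
instance (verified : List (List (String × Int))) : Decidable (Pre_stage5_select verified) := by unfold Pre_stage5_select; infer_instance

def pvWitness_stage5_select : (List (List (String × Int))) :=
  [[("orig_pass", 1), ("total_pass", 2), ("aux_pass", 0)]]

def Spec_stage5_select (verified : List (List (String × Int))) (out : List (String × Int)) : Prop := out = stage5_select_alt verified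
instance (verified : List (List (String × Int))) (out : List (String × Int)) : Decidable (Spec_stage5_select verified out) := by unfold Spec_stage5_select; infer_instance

-- ===== CLAIM (what is proved, stated in full; the proofs are below) =====
def Claim_equal_stage5_select : Prop := ∀ (verified : List (List (String × Int))), Dom_stage5_select verified → Pre_stage5_select verified → Spec_stage5_select verified (stage5_select verified)

-- ===== LEMMAS AND PROOFS =====

-- the "first element with maximal pvTP" selector both sides reduce to
def pvStep (acc : Option (List (String × Int))) (v : List (String × Int)) : Option (List (String × Int)) :=
  match acc with
  | none => some v
  | some m => if pvTP m < pvTP v then some v else some m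

theorem pv_head_insertBy {α : Type} (bef : α → α → Bool) (x : α) (acc : List α) :
    (PySem.List.insertBy bef x acc).head? =
      some (match acc.head? with | none => x | some m => if bef x m then x else m) := by
  cases acc with
  | nil => simp [PySem.List.insertBy]
  | cons y ys => by_cases h : bef x y <;> simp [PySem.List.insertBy, h]

theorem pv_head_foldl_insertBy {α : Type} (bef : α → α → Bool) (l : List α) (acc : List α) :
    (l.foldl (fun acc x => PySem.List.insertBy bef x acc) acc).head? =
      l.foldl (fun o x => some (match o with | none => x | some m => if bef x m then x else m)) acc.head? := by
  induction l generalizing acc with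
  | nil => rfl
  | cons x t ih =>
      simp only [List.foldl_cons]
      rw [ih, pv_head_insertBy]

theorem pv_sorted_head (l : List (List (String × Int))) :
    (PySem.List.sorted l (fun x => -(pvTP x)) false).head? = l.foldl pvStep none := by
  rw [PySem.List.sorted_eq_foldl_insertBy, pv_head_foldl_insertBy]
  apply PySem.List.foldl_congr_mem
  intro o x _
  cases o with
  | none => rfl
  | some m => by_cases h : pvTP m < pvTP x <;> simp [pvStep, neg_lt_neg_iff, h]

theorem pv_foldStep_some (l : List (List (String × Int))) (m : List (String × Int)) :
    ∃ m', l.foldl pvStep (some m) = some m' := by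
  induction l generalizing m with
  | nil => exact ⟨m, rfl⟩
  | cons x t ih =>
      by_cases h : pvTP m < pvTP x
      · simpa [pvStep, h] using ih x
      · simpa [pvStep, h] using ih m

theorem pv_fold_alt (l : List (List (String × Int))) (o : Option (List (String × Int))) :
    l.foldl
      (fun acc v =>
        if pvTruthy v "orig_pass" then
          match acc with
          | none => some (v, pvTP v)
          | some (b, bt) => if pvTP v > bt then some (v, pvTP v) else some (b, bt)
        else acc)
      (o.map (fun m => (m, pvTP m)))
    = ((l.filter (fun v => pvTruthy v "orig_pass")).foldl pvStep o).map (fun m => (m, pvTP m)) := by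
  induction l generalizing o with
  | nil => rfl
  | cons v t ih =>
      simp only [List.foldl_cons, List.filter_cons]
      by_cases h : pvTruthy v "orig_pass"
      · have hstep : (match o.map (fun m => (m, pvTP m)) with
            | none => some (v, pvTP v)
            | some (b, bt) => if pvTP v > bt then some (v, pvTP v) else some (b, bt))
            = (pvStep o v).map (fun m => (m, pvTP m)) := by
          cases o with
          | none => rfl
          | some m =>
              by_cases hc : pvTP m < pvTP v <;> simp [pvStep, hc]
        simp only [h, ite_true, List.foldl_cons]
        rw [hstep]
        exact ih (pvStep o v)
      · simp only [h, Bool.false_eq_true, ite_false]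
        exact ih o

-- ===== VERDICT (by name: the statement is the Claim_ definition above) =====
theorem stage5_select_spec : Claim_equal_stage5_select := by
  intro verified _ _
  unfold Spec_stage5_select stage5_select stage5_select_alt
  simp only []
  have hbest := pv_fold_alt verified none
  simp only [Option.map_none] at hbest
  rw [hbest]
  by_cases ho : verified.filter (fun v => pvTruthy v "orig_pass") = []
  · rw [ho]
    simp only [List.foldl_nil, Option.map_none, ne_eq, not_true_eq_false, ite_false]
    rw [← List.head?_filter]
    by_cases ha : verified.filter (fun v => pvTruthy v "aux_pass") = []
    · simp [ha]
    · obtain ⟨a, t, hat⟩ := List.exists_cons_of_ne_nil ha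
      simp [hat]
  · obtain ⟨x, t, hxt⟩ := List.exists_cons_of_ne_nil ho
    have hsome : ∃ m, (verified.filter (fun v => pvTruthy v "orig_pass")).foldl pvStep none = some m := by
      rw [hxt]; simpa [pvStep] using pv_foldStep_some t x
    obtain ⟨m, hm⟩ := hsome
    rw [hm]
    simp only [ho, ne_eq, not_false_iff, if_pos, Option.map_some]
    rw [List.headD_eq_head?_getD, pv_sorted_head, hm]
    rfl
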